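-- pv_equiv track=rewrite | github.com/ctc316/algorithm-python | Lintcode/Ladder_48_Backpack/2_Multiple_Choice Backpack/799. Backpack VIII.py | backPackVIII
-- ===== SOURCE A (Python) =====
-- def backPackVIII(n, value, amount):
--     '''
--         5
--         [1,2,4]
--         [2,1,1]
--
--         [1,0,0,0,0,0]
--         [1,1,0,0,0,0]
--         [1,1,1,0,0,0]
--         [1,1,1,1,1,0]
--         [1,1,1,1,1,1]
--
--     '''
--     dp = [False for _ in range(n + 1)]
--     dp[0] = True
--     for i in range(len(value)):
--         for j in range(amount[i]):
--             for k in range(n, value[i] - 1, -1):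
--                 dp[k] = dp[k] or dp[k - value[i]]
--
--     count = 0
--     for i in range(1, n + 1):
--         if dp[i]:
--             count += 1
--
--     return count
-- ===== SOURCE B (Python) =====
-- def backPackVIII(n, value, amount):
--     # Bounded knapsack feasibility: one forward scan per item with a
--     # copies-remaining counter array instead of repeated 0/1 passes.
--     dp = [False for _ in range(n + 1)]
--     dp[0] = True
--     for v, a in zip(value, amount):
--         if a <= 0 or v == 0:
--             continue
--         if v < 0:
--             raise ValueError("item values must be nonnegative")
--         cnt = [-1 for _ in range(n + 1)]
--         for k in range(n + 1):
--             if dp[k]: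
--                 cnt[k] = a
--             elif k >= v and cnt[k - v] > 0:
--                 cnt[k] = cnt[k - v] - 1
--                 dp[k] = True
--     return sum(dp) - 1
-- ===== Notes on version B (the rewrite author's own statement) =====
-- stated objective: alternative
-- what changed: B replaces A's amount[i] backward 0/1-knapsack passes per item by a single forward scan per item carrying a copies-remaining counter array and counts via sum(dp)-1; Pre_ excludes n<0 and amount shorter than value (A raises IndexError) and items with negative value and positive amount, outside the task's natural domain, where A raises IndexError or through Python's negative indexing returns an accidental value while B rejects the input with ValueError.
-- outside the precondition, e.g. on backPackVIII(3, [6, 3, -1, -3], [0, 2, 4, 0]): A returns 3, B raises ValueError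
import Mathlib
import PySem

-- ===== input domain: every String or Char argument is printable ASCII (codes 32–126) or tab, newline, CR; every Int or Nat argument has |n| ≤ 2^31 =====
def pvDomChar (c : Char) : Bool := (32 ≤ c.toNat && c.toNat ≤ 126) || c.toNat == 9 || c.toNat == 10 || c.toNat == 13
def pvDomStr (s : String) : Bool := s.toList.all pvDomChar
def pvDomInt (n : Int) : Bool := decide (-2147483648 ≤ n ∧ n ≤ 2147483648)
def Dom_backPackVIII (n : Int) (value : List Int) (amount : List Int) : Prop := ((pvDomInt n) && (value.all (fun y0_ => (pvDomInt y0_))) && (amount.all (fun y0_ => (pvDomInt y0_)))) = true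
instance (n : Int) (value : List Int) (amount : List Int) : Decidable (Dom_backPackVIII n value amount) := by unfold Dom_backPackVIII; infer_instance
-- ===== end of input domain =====

-- B replaces A's amount[i] backward knapsack passes per item by one forward scan per item
-- with a copies-remaining counter array (a different bounded-knapsack formulation).


-- ===== PORT A =====
-- Python list indexing on arrays (index resolution is PySem.List.pyIdx?, i.e. Python-exact;
-- used by both ports, which hold dp in an Array for O(1) reads/writes)
def pyAGetD {α : Type} (xs : Array α) (i : Int) (d : α) : α :=
  match PySem.List.pyIdx? xs.size i with
  | some k => xs.getD k d
  | none => d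

def pyASetD {α : Type} (xs : Array α) (i : Int) (v : α) : Array α :=
  match PySem.List.pyIdx? xs.size i with
  | some k => xs.setIfInBounds k v
  | none => xs

-- the innermost loop: for k in range(n, value[i]-1, -1): dp[k] = dp[k] or dp[k - value[i]]
def aPass (n v : Int) (dp : Array Bool) : Array Bool :=
  (PySem.List.pyRange n (v - 1) (-1)).foldl
    (fun dp k => pyASetD dp k (pyAGetD dp k false || pyAGetD dp (k - v) false)) dp

-- the middle loop: for j in range(amount[i]): <inner loop>
def aItem (n : Int) (dp : Array Bool) (v a : Int) : Array Bool :=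
  (PySem.List.pyRange 0 a 1).foldl (fun dp _ => aPass n v dp) dp

-- dp = [False for _ in range(n+1)]; dp[0] = True
def aInit (n : Int) : Array Bool :=
  pyASetD ((PySem.List.pyRange 0 (n + 1) 1).map (fun _ => false)).toArray 0 true

-- the final counting loop
def aCount (n : Int) (dp : Array Bool) : Int :=
  (PySem.List.pyRange 1 (n + 1) 1).foldl
    (fun count i => if pyAGetD dp i false then count + 1 else count) 0

def backPackVIII (n : Int) (value : List Int) (amount : List Int) : Int :=
  aCount n ((PySem.List.pyRange 0 (PySem.List.len value) 1).foldl
    (fun dp i => aItem n dp (PySem.List.pyGetD value i 0) (PySem.List.pyGetD amount i 0)) (aInit n))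

-- ===== PORT B =====
-- one step of B's forward scan: state is (cnt, dp)
def bScan (_n v a : Int) (st : Array Int × Array Bool) (k : Int) : Array Int × Array Bool :=
  if pyAGetD st.2 k false then (pyASetD st.1 k a, st.2)
  else if v ≤ k ∧ 0 < pyAGetD st.1 (k - v) 0 then
    (pyASetD st.1 k (pyAGetD st.1 (k - v) 0 - 1), pyASetD st.2 k true)
  else st

-- one item: if a <= 0 or v == 0: continue; if v < 0: raise ValueError (those inputs are
-- outside Pre_; the port leaves dp there); cnt = [-1 ...]; for k in range(n+1): <scan step>
def bItem (n : Int) (dp : Array Bool) (v a : Int) : Array Bool :=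
  if a ≤ 0 ∨ v = 0 then dp
  else if v < 0 then dp
  else
    ((PySem.List.pyRange 0 (n + 1) 1).foldl (bScan n v a)
      (((PySem.List.pyRange 0 (n + 1) 1).map (fun _ => (-1 : Int))).toArray, dp)).2

-- dp = [False for _ in range(n+1)]; dp[0] = True
def bInit (n : Int) : Array Bool :=
  pyASetD ((PySem.List.pyRange 0 (n + 1) 1).map (fun _ => false)).toArray 0 true

-- sum(dp) (True counts as 1)
def bSum (dp : Array Bool) : Int :=
  dp.foldl (fun acc b => acc + (if b then 1 else 0)) 0

def backPackVIII_alt (n : Int) (value : List Int) (amount : List Int) : Int :=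
  bSum ((value.zip amount).foldl (fun dp p => bItem n dp p.1 p.2) (bInit n)) - 1

-- ===== PRECONDITION & SPEC =====
-- Pre_ excludes n < 0 and amount shorter than value (A raises IndexError there), and items
-- with a negative value and a positive amount, outside the task's natural domain: on those
-- A either raises IndexError or, through Python's negative indexing, returns an accidental value.
def Pre_backPackVIII (n : Int) (value : List Int) (amount : List Int) : Prop :=
  0 ≤ n ∧ value.length ≤ amount.length ∧ ∀ p ∈ value.zip amount, 0 ≤ p.1 ∨ p.2 ≤ 0
instance (n : Int) (value : List Int) (amount : List Int) : Decidable (Pre_backPackVIII n value amount) := by unfold Pre_backPackVIII; infer_instance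

def pvWitness_backPackVIII : Int × List Int × List Int := (5, [1, 2, 4], [2, 1, 1])

def Spec_backPackVIII (n : Int) (value : List Int) (amount : List Int) (out : Int) : Prop := out = backPackVIII_alt n value amount
instance (n : Int) (value : List Int) (amount : List Int) (out : Int) : Decidable (Spec_backPackVIII n value amount out) := by unfold Spec_backPackVIII; infer_instance

-- ===== CLAIM (what is proved, stated in full; the proofs are below) =====
def Claim_equal_backPackVIII : Prop := ∀ (n : Int) (value : List Int) (amount : List Int), Dom_backPackVIII n value amount → Pre_backPackVIII n value amount → Spec_backPackVIII n value amount (backPackVIII n value amount)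

-- ===== LEMMAS AND PROOFS =====

-- list-level shadows of the two ports' loops (all reasoning happens on lists)
def aPassL (n v : Int) (dp : List Bool) : List Bool :=
  (PySem.List.pyRange n (v - 1) (-1)).foldl
    (fun dp k => PySem.List.pySetD dp k (PySem.List.pyGetD dp k false || PySem.List.pyGetD dp (k - v) false)) dp

def aItemL (n : Int) (dp : List Bool) (v a : Int) : List Bool :=
  (PySem.List.pyRange 0 a 1).foldl (fun dp _ => aPassL n v dp) dp

def aInitL (n : Int) : List Bool :=
  PySem.List.pySetD ((PySem.List.pyRange 0 (n + 1) 1).map (fun _ => false)) 0 true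

def aCountL (n : Int) (dp : List Bool) : Int :=
  (PySem.List.pyRange 1 (n + 1) 1).foldl
    (fun count i => if PySem.List.pyGetD dp i false then count + 1 else count) 0

def bScanL (_n v a : Int) (st : List Int × List Bool) (k : Int) : List Int × List Bool :=
  if PySem.List.pyGetD st.2 k false then (PySem.List.pySetD st.1 k a, st.2)
  else if v ≤ k ∧ 0 < PySem.List.pyGetD st.1 (k - v) 0 then
    (PySem.List.pySetD st.1 k (PySem.List.pyGetD st.1 (k - v) 0 - 1), PySem.List.pySetD st.2 k true)
  else st

def cntInitL (n : Int) : List Int := (PySem.List.pyRange 0 (n + 1) 1).map (fun _ => (-1 : Int))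

def bItemL (n : Int) (dp : List Bool) (v a : Int) : List Bool :=
  if a ≤ 0 ∨ v = 0 then dp
  else if v < 0 then dp
  else
    ((PySem.List.pyRange 0 (n + 1) 1).foldl (bScanL n v a) (cntInitL n, dp)).2

-- ---- array/list bridges ----
theorem pyAGetD_toList {α : Type} (xs : Array α) (i : Int) (d : α) :
    pyAGetD xs i d = PySem.List.pyGetD xs.toList i d := by
  simp only [pyAGetD, PySem.List.pyGetD, PySem.List.pyGet?, Array.length_toList]
  cases h : PySem.List.pyIdx? xs.size i with
  | none => simp
  | some k =>
    simp only [Option.bind_some]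
    by_cases hk : k < xs.size
    · simp [Array.getD, hk]
    · simp [Array.getD, hk]

theorem pyASetD_toList {α : Type} (xs : Array α) (i : Int) (v : α) :
    (pyASetD xs i v).toList = PySem.List.pySetD xs.toList i v := by
  simp only [pyASetD, PySem.List.pySetD, PySem.List.pySet?, Array.length_toList]
  cases h : PySem.List.pyIdx? xs.size i with
  | none => simp
  | some k => simp [Array.toList_setIfInBounds]

theorem aPass_toList (n v : Int) (dp : Array Bool) :
    (aPass n v dp).toList = aPassL n v dp.toList := by
  unfold aPass aPassL
  exact (List.foldl_hom Array.toList
    (fun x y => by simp only [pyASetD_toList, pyAGetD_toList])).symm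

theorem aItem_toList (n : Int) (dp : Array Bool) (v a : Int) :
    (aItem n dp v a).toList = aItemL n dp.toList v a := by
  unfold aItem aItemL
  exact (List.foldl_hom Array.toList (fun x _ => (aPass_toList n v x).symm)).symm

theorem aInit_toList (n : Int) : (aInit n).toList = aInitL n := by
  unfold aInit aInitL
  simp [pyASetD_toList]

theorem aCount_toList (n : Int) (dp : Array Bool) : aCount n dp = aCountL n dp.toList := by
  unfold aCount aCountL
  simp only [pyAGetD_toList]

theorem bScan_toList (n v a : Int) (st : Array Int × Array Bool) (k : Int) :
    ((bScan n v a st k).1.toList, (bScan n v a st k).2.toList) =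
      bScanL n v a (st.1.toList, st.2.toList) k := by
  simp only [bScan, bScanL, pyAGetD_toList]
  split
  · simp [pyASetD_toList]
  · split
    · simp [pyASetD_toList]
    · rfl

theorem bItem_toList (n : Int) (dp : Array Bool) (v a : Int) :
    (bItem n dp v a).toList = bItemL n dp.toList v a := by
  unfold bItem bItemL
  by_cases h0 : a ≤ 0 ∨ v = 0
  · rw [if_pos h0, if_pos h0]
  · rw [if_neg h0, if_neg h0]
    by_cases h1 : v < 0
    · rw [if_pos h1, if_pos h1]
    · rw [if_neg h1, if_neg h1]
      have hh := List.foldl_hom (l := PySem.List.pyRange 0 (n + 1) 1)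
        (init := (((PySem.List.pyRange 0 (n + 1) 1).map (fun _ => (-1 : Int))).toArray, dp))
        (f := fun (st : Array Int × Array Bool) => (st.1.toList, st.2.toList))
        (g₁ := bScan n v a) (g₂ := bScanL n v a)
        (fun x y => (bScan_toList n v a x y).symm)
      simp only [] at hh
      have hinit : ((((PySem.List.pyRange 0 (n + 1) 1).map (fun _ => (-1 : Int))).toArray).toList,
          dp.toList) = (cntInitL n, dp.toList) := by
        simp [cntInitL]
      rw [hinit] at hh
      exact congrArg Prod.snd hh.symm

theorem bInit_toList (n : Int) : (bInit n).toList = aInitL n := by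
  unfold bInit aInitL
  simp [pyASetD_toList]

theorem bSum_toList (dp : Array Bool) :
    bSum dp = dp.toList.foldl (fun acc b => acc + (if b then 1 else 0)) 0 := by
  unfold bSum
  exact (Array.foldl_toList _).symm

-- ---- generic facts about Python reads/writes on lists ----
theorem pySetD_pyGetD_self {α : Type} (xs : List α) (i : Int) (d : α) :
    PySem.List.pySetD xs i (PySem.List.pyGetD xs i d) = xs := by
  simp only [PySem.List.pySetD, PySem.List.pySet?, PySem.List.pyGetD, PySem.List.pyGet?]
  cases h : PySem.List.pyIdx? xs.length i with
  | none => simp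
  | some k =>
    simp only [Option.bind_some, Option.map_some, Option.getD_some]
    have hk : k < xs.length := by
      simp only [PySem.List.pyIdx?] at h
      split at h <;> simp_all <;> omega
    simp [List.getElem?_eq_getElem hk, List.set_getElem_self]

theorem pyGetD_pySetD_int {α : Type} (dp : List α) (m k : Int) (w d : α)
    (hm0 : 0 ≤ m) (hk0 : 0 ≤ k) (hk : k.toNat < dp.length) :
    PySem.List.pyGetD (PySem.List.pySetD dp m w) k d = if k = m then w else PySem.List.pyGetD dp k d := by
  rw [PySem.List.pySetD_of_nonneg _ _ hm0]
  rw [PySem.List.pyGetD_eq_getElem _ _ hk0 (by simp only [List.length_set]; omega)]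
  rw [List.getElem_set]
  by_cases hkm : k = m
  · rw [if_pos (by omega), if_pos hkm]
  · rw [if_neg (by omega), if_neg hkm]
    rw [PySem.List.pyGetD_eq_getElem _ _ hk0 (by omega)]

-- ---- the initial dp ----
def GoodDp (n : Int) (dp : List Bool) : Prop :=
  dp.length = (n + 1).toNat ∧ PySem.List.pyGetD dp 0 false = true

theorem aInitL_good (n : Int) (hn : 0 ≤ n) : GoodDp n (aInitL n) := by
  have hmlen : ((PySem.List.pyRange 0 (n + 1) 1).map (fun _ => false)).length = (n + 1).toNat := by
    simp [PySem.List.length_pyRange_one]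
  have hlen : (aInitL n).length = (n + 1).toNat := by
    unfold aInitL
    rw [PySem.List.pySetD_of_nonneg _ _ (by norm_num)]
    simp only [List.length_set]
    exact hmlen
  refine ⟨hlen, ?_⟩
  unfold aInitL
  rw [pyGetD_pySetD_int _ _ _ _ _ (le_refl 0) (le_refl 0) (by omega)]
  simp

-- ---- A side: what amount[i] backward passes compute ----
theorem aPass_aux (n v : Int) (hv : 0 < v) :
    ∀ (t : Nat) (m : Int) (dp : List Bool), m ≤ n → dp.length = (n + 1).toNat → (m - v + 1).toNat = t →
    ((PySem.List.pyRange m (v - 1) (-1)).foldl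
        (fun dp k => PySem.List.pySetD dp k (PySem.List.pyGetD dp k false || PySem.List.pyGetD dp (k - v) false)) dp).length = dp.length ∧
    ∀ k : Int, 0 ≤ k → k ≤ n →
      PySem.List.pyGetD ((PySem.List.pyRange m (v - 1) (-1)).foldl
        (fun dp k => PySem.List.pySetD dp k (PySem.List.pyGetD dp k false || PySem.List.pyGetD dp (k - v) false)) dp) k false =
      if v ≤ k ∧ k ≤ m then (PySem.List.pyGetD dp k false || PySem.List.pyGetD dp (k - v) false) else PySem.List.pyGetD dp k false := by
  intro t
  induction t with
  | zero =>
    intro m dp hmn hlen ht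
    rw [PySem.List.pyRange_neg_one_eq_nil (by omega)]
    simp only [List.foldl_nil]
    refine ⟨by simp, ?_⟩
    intro k hk0 hkn
    rw [if_neg (by intro hh; omega)]
  | succ t ih =>
    intro m dp hmn hlen ht
    rw [PySem.List.pyRange_neg_one_cons (by omega)]
    simp only [List.foldl_cons]
    have hm0 : 0 ≤ m := by omega
    have hlen1 : (PySem.List.pySetD dp m
        (PySem.List.pyGetD dp m false || PySem.List.pyGetD dp (m - v) false)).length = (n + 1).toNat := by
      rw [PySem.List.length_pySetD, hlen]
    have hrec := ih (m - 1) _ (by omega) hlen1 (by omega)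
    refine ⟨by rw [hrec.1, hlen1, hlen], ?_⟩
    intro k hk0 hkn
    rw [hrec.2 k hk0 hkn]
    have hget1 : ∀ (k' : Int), 0 ≤ k' → k' ≤ n →
        PySem.List.pyGetD (PySem.List.pySetD dp m
          (PySem.List.pyGetD dp m false || PySem.List.pyGetD dp (m - v) false)) k' false =
        if k' = m then (PySem.List.pyGetD dp m false || PySem.List.pyGetD dp (m - v) false)
        else PySem.List.pyGetD dp k' false := by
      intro k' h0 h1
      exact pyGetD_pySetD_int dp m k' _ false hm0 h0 (by omega)
    by_cases hc : v ≤ k ∧ k ≤ m - 1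
    · rw [if_pos hc, if_pos (by omega)]
      rw [hget1 k hk0 hkn, if_neg (by omega), hget1 (k - v) (by omega) (by omega), if_neg (by omega)]
    · rw [if_neg hc]
      by_cases hkm : k = m
      · subst hkm
        rw [if_pos ⟨by omega, le_refl k⟩]
        rw [hget1 k hk0 hkn, if_pos rfl]
      · rw [if_neg (by intro hh; exact hkm (by omega))]
        rw [hget1 k hk0 hkn, if_neg hkm]

theorem aPassL_spec (n v : Int) (hv : 0 < v) (dp : List Bool) (hlen : dp.length = (n + 1).toNat) :
    (aPassL n v dp).length = dp.length ∧
    ∀ k : Int, 0 ≤ k → k ≤ n →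
      PySem.List.pyGetD (aPassL n v dp) k false =
        (PySem.List.pyGetD dp k false || (decide (v ≤ k) && PySem.List.pyGetD dp (k - v) false)) := by
  obtain ⟨h1, h2⟩ := aPass_aux n v hv ((n - v + 1).toNat) n dp le_rfl hlen rfl
  refine ⟨h1, ?_⟩
  intro k hk0 hkn
  unfold aPassL
  rw [h2 k hk0 hkn]
  by_cases hvk : v ≤ k
  · rw [if_pos ⟨hvk, hkn⟩]; simp [hvk]
  · rw [if_neg (by intro hh; exact hvk hh.1)]; simp [hvk]

theorem aPassL_zero (n : Int) (dp : List Bool) : aPassL n 0 dp = dp := by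
  unfold aPassL
  rw [PySem.List.foldl_congr_mem _ _ (fun d (_ : Int) => d) dp
    (by intro acc x _
        have hx : x - 0 = x := by ring
        rw [hx, Bool.or_self]
        exact pySetD_pyGetD_self acc x false)]
  exact PySem.List.foldl_ignore _ _

theorem aItemL_spec (n v : Int) (hv : 0 < v) (a : Nat) (dp : List Bool) (hlen : dp.length = (n + 1).toNat) :
    (aItemL n dp v (a : Int)).length = dp.length ∧
    ∀ k : Int, 0 ≤ k → k ≤ n →
      (PySem.List.pyGetD (aItemL n dp v (a : Int)) k false = true ↔
        ∃ j : Nat, j ≤ a ∧ (j : Int) * v ≤ k ∧ PySem.List.pyGetD dp (k - (j : Int) * v) false = true) := by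
  induction a with
  | zero =>
    unfold aItemL
    rw [show ((0 : Nat) : Int) = 0 from rfl, PySem.List.pyRange_one_eq_nil (le_refl 0)]
    refine ⟨rfl, ?_⟩
    intro k hk0 hkn
    simp only [List.foldl_nil]
    constructor
    · intro h
      exact ⟨0, le_refl 0, by simpa using hk0, by simpa using h⟩
    · rintro ⟨j, hj, _, hdp⟩
      have hj0 : j = 0 := by omega
      subst hj0
      simpa using hdp
  | succ a ih =>
    obtain ⟨ihlen, ihval⟩ := ih
    have hcast : ((a + 1 : Nat) : Int) = (a : Int) + 1 := by push_cast; ring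
    have hstep : aItemL n dp v ((a + 1 : Nat) : Int) = aPassL n v (aItemL n dp v (a : Int)) := by
      unfold aItemL
      rw [hcast, PySem.List.pyRange_one_succ_right (by positivity), List.foldl_append]
      simp
    obtain ⟨plen, pval⟩ := aPassL_spec n v hv (aItemL n dp v (a : Int)) (by rw [ihlen, hlen])
    rw [hstep]
    refine ⟨by rw [plen, ihlen], ?_⟩
    intro k hk0 hkn
    rw [pval k hk0 hkn]
    simp only [Bool.or_eq_true, Bool.and_eq_true, decide_eq_true_eq]
    rw [ihval k hk0 hkn]
    constructor
    · rintro (⟨j, hja, hjv, hdp⟩ | ⟨hvk, hy⟩)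
      · exact ⟨j, by omega, hjv, hdp⟩
      · rw [ihval (k - v) (by omega) (by omega)] at hy
        obtain ⟨j, hja, hjv, hdp⟩ := hy
        refine ⟨j + 1, by omega, by push_cast; linarith, ?_⟩
        convert hdp using 2
        push_cast; ring
    · rintro ⟨j, hja, hjv, hdp⟩
      by_cases hj : j ≤ a
      · exact Or.inl ⟨j, hj, hjv, hdp⟩
      · have hj1 : j = a + 1 := by omega
        subst hj1
        have hvk : v ≤ k := by
          have h1 : (1 : Int) * v ≤ ((a + 1 : Nat) : Int) * v := by
            apply mul_le_mul_of_nonneg_right _ (le_of_lt hv)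
            push_cast; omega
          linarith
        refine Or.inr ⟨hvk, ?_⟩
        rw [ihval (k - v) (by omega) (by omega)]
        refine ⟨a, le_refl a, by push_cast at hjv ⊢; linarith, ?_⟩
        convert hdp using 2
        push_cast; ring

-- ---- B side: what one forward scan with the copies-remaining counter computes ----
def WitP (dp : List Bool) (v a k : Int) (j : Nat) : Prop :=
  (j : Int) ≤ a ∧ (j : Int) * v ≤ k ∧ PySem.List.pyGetD dp (k - (j : Int) * v) false = true

def BQ (n v a : Int) (dp : List Bool) (K : Int) (st : List Int × List Bool) : Prop :=
  st.1.length = (n + 1).toNat ∧ st.2.length = (n + 1).toNat ∧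
  (∀ k : Int, 0 ≤ k → k ≤ n → K ≤ k →
    PySem.List.pyGetD st.1 k 0 = -1 ∧ PySem.List.pyGetD st.2 k false = PySem.List.pyGetD dp k false) ∧
  (∀ k : Int, 0 ≤ k → k < K →
    (PySem.List.pyGetD st.2 k false = true ↔ ∃ j : Nat, WitP dp v a k j) ∧
    ((∃ j : Nat, (WitP dp v a k j ∧ ∀ i : Nat, i < j → ¬ WitP dp v a k i) ∧
        PySem.List.pyGetD st.1 k 0 = a - (j : Int)) ∨
      ((¬ ∃ j : Nat, WitP dp v a k j) ∧ PySem.List.pyGetD st.1 k 0 = -1)))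

theorem bScan_aux (n v a : Int) (hn : 0 ≤ n) (hv : 0 < v) (ha : 0 < a) (dp : List Bool)
    (hlen : dp.length = (n + 1).toNat) :
    ∀ (t : Nat) (K : Int), 0 ≤ K → K ≤ n + 1 → K.toNat = t →
      BQ n v a dp K ((PySem.List.pyRange 0 K 1).foldl (bScanL n v a) (cntInitL n, dp)) := by
  intro t
  induction t with
  | zero =>
    intro K hK0 hKn ht
    have hK : K = 0 := by omega
    subst hK
    rw [PySem.List.pyRange_one_eq_nil (le_refl 0)]
    simp only [List.foldl_nil]
    refine ⟨by simp [cntInitL, PySem.List.length_pyRange_one], hlen, ?_, ?_⟩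
    · intro k hk0 hkn _
      refine ⟨?_, rfl⟩
      rw [PySem.List.pyGetD_eq_getElem _ _ hk0
        (by simp [cntInitL, PySem.List.length_pyRange_one]; omega)]
      simp [cntInitL]
    · intro k hk0 hkK
      omega
  | succ t ih =>
    intro K hK0 hKn ht
    have hK : K = (K - 1) + 1 := by ring
    rw [hK, PySem.List.pyRange_one_succ_right (by omega), List.foldl_append]
    simp only [List.foldl_cons, List.foldl_nil]
    obtain ⟨hc1, hd1, hun, hpr⟩ := ih (K - 1) (by omega) (by omega) (by omega)
    set st := (PySem.List.pyRange 0 (K - 1) 1).foldl (bScanL n v a) (cntInitL n, dp) with hst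
    set M := K - 1 with hM
    have hM0 : 0 ≤ M := by omega
    have hMn : M ≤ n := by omega
    have hdpM : PySem.List.pyGetD st.2 M false = PySem.List.pyGetD dp M false :=
      (hun M hM0 hMn (le_refl M)).2
    unfold bScanL
    by_cases htrue : PySem.List.pyGetD dp M false = true
    · rw [if_pos (by rw [hdpM]; exact htrue)]
      refine ⟨by rw [PySem.List.length_pySetD, hc1], hd1, ?_, ?_⟩
      · intro k hk0 hkn hMk
        refine ⟨?_, (hun k hk0 hkn (by omega)).2⟩
        rw [pyGetD_pySetD_int _ _ _ _ _ hM0 hk0 (by omega), if_neg (by omega)]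
        exact (hun k hk0 hkn (by omega)).1
      · intro k hk0 hkK
        by_cases hkM : k = M
        · rw [hkM]
          have hwit0 : WitP dp v a M 0 := by
            refine ⟨by simpa using le_of_lt ha, by simpa using hM0, by simpa using htrue⟩
          refine ⟨?_, ?_⟩
          · rw [hdpM]
            simp only [htrue, true_iff]
            exact ⟨0, hwit0⟩
          · left
            refine ⟨0, ⟨hwit0, by omega⟩, ?_⟩
            rw [pyGetD_pySetD_int _ _ _ _ _ hM0 hM0 (by omega), if_pos rfl]
            simp
        · have hkM' : k < M := by omega
          have hread : PySem.List.pyGetD (PySem.List.pySetD st.1 M a) k 0 =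
              PySem.List.pyGetD st.1 k 0 := by
            rw [pyGetD_pySetD_int _ _ _ _ _ hM0 hk0 (by omega), if_neg hkM]
          obtain ⟨hch, hcnt⟩ := hpr k hk0 hkM'
          refine ⟨hch, ?_⟩
          rw [hread]
          exact hcnt
    · have hfalse : PySem.List.pyGetD dp M false = false := by
        cases h : PySem.List.pyGetD dp M false
        · rfl
        · exact absurd h htrue
      rw [if_neg (by rw [hdpM, hfalse]; simp)]
      by_cases hcond : v ≤ M ∧ 0 < PySem.List.pyGetD st.1 (M - v) 0
      · obtain ⟨hvM, hcpos⟩ := hcond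
        rw [if_pos ⟨hvM, hcpos⟩]
        have hMv0 : 0 ≤ M - v := by omega
        obtain ⟨hchv, hcntv⟩ := hpr (M - v) hMv0 (by omega)
        rcases hcntv with ⟨j0, ⟨hwit0, hmin0⟩, hcnt0⟩ | ⟨_, hcnt0⟩
        swap
        · rw [hcnt0] at hcpos; omega
        have hj0a : (j0 : Int) < a := by rw [hcnt0] at hcpos; omega
        have hwitM : WitP dp v a M (j0 + 1) := by
          refine ⟨by push_cast; omega, ?_, ?_⟩
          · have he : ((j0 + 1 : Nat) : Int) * v = (j0 : Int) * v + v := by push_cast; ring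
            rw [he]; linarith [hwit0.2.1]
          · have he : M - ((j0 + 1 : Nat) : Int) * v = (M - v) - (j0 : Int) * v := by push_cast; ring
            rw [he]; exact hwit0.2.2
        have hminM : ∀ i : Nat, i < j0 + 1 → ¬ WitP dp v a M i := by
          intro i hi hwC
          cases i with
          | zero =>
            have := hwC.2.2
            simp at this
            rw [this] at hfalse
            exact absurd hfalse (by simp)
          | succ i' =>
            have hwv : WitP dp v a (M - v) i' := by
              have h1C := hwC.1
              refine ⟨by push_cast at h1C ⊢; omega, ?_, ?_⟩
              · have he : ((i' + 1 : Nat) : Int) * v = (i' : Int) * v + v := by push_cast; ring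
                have := hwC.2.1
                rw [he] at this
                linarith
              · have he : M - ((i' + 1 : Nat) : Int) * v = (M - v) - (i' : Int) * v := by push_cast; ring
                rw [← he]; exact hwC.2.2
            exact hmin0 i' (by omega) hwv
        refine ⟨by rw [PySem.List.length_pySetD, hc1], by rw [PySem.List.length_pySetD, hd1], ?_, ?_⟩
        · intro k hk0 hkn hMk
          constructor
          · rw [pyGetD_pySetD_int _ _ _ _ _ hM0 hk0 (by omega), if_neg (by omega)]
            exact (hun k hk0 hkn (by omega)).1
          · rw [pyGetD_pySetD_int _ _ _ _ _ hM0 hk0 (by omega), if_neg (by omega)]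
            exact (hun k hk0 hkn (by omega)).2
        · intro k hk0 hkK
          by_cases hkM : k = M
          · rw [hkM]
            refine ⟨?_, ?_⟩
            · rw [pyGetD_pySetD_int _ _ _ _ _ hM0 hM0 (by omega), if_pos rfl]
              simp only [true_iff]
              exact ⟨j0 + 1, hwitM⟩
            · left
              refine ⟨j0 + 1, ⟨hwitM, hminM⟩, ?_⟩
              rw [pyGetD_pySetD_int _ _ _ _ _ hM0 hM0 (by omega), if_pos rfl, hcnt0]
              push_cast; ring
          · have hkM' : k < M := by omega
            have hreadc : PySem.List.pyGetD (PySem.List.pySetD st.1 M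
                (PySem.List.pyGetD st.1 (M - v) 0 - 1)) k 0 = PySem.List.pyGetD st.1 k 0 := by
              rw [pyGetD_pySetD_int _ _ _ _ _ hM0 hk0 (by omega), if_neg hkM]
            have hreadd : PySem.List.pyGetD (PySem.List.pySetD st.2 M true) k false =
                PySem.List.pyGetD st.2 k false := by
              rw [pyGetD_pySetD_int _ _ _ _ _ hM0 hk0 (by omega), if_neg hkM]
            obtain ⟨hch, hcnt⟩ := hpr k hk0 hkM'
            refine ⟨?_, ?_⟩
            · rw [hreadd]
              exact hch
            · rw [hreadc]
              exact hcnt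
      · rw [if_neg hcond]
        have hNE : ¬ ∃ j : Nat, WitP dp v a M j := by
          rintro ⟨j, hw⟩
          cases j with
          | zero =>
            have := hw.2.2
            simp at this
            rw [this] at hfalse
            exact absurd hfalse (by simp)
          | succ j' =>
            have hvM : v ≤ M := by
              have h1 : (1 : Int) * v ≤ ((j' + 1 : Nat) : Int) * v := by
                apply mul_le_mul_of_nonneg_right _ (le_of_lt hv)
                push_cast; omega
              have := hw.2.1
              linarith
            have hwv : WitP dp v a (M - v) j' := by
              have h1w := hw.1
              refine ⟨by push_cast at h1w ⊢; omega, ?_, ?_⟩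
              · have he : ((j' + 1 : Nat) : Int) * v = (j' : Int) * v + v := by push_cast; ring
                have := hw.2.1
                rw [he] at this
                linarith
              · have he : M - ((j' + 1 : Nat) : Int) * v = (M - v) - (j' : Int) * v := by push_cast; ring
                rw [← he]; exact hw.2.2
            have hMv0 : 0 ≤ M - v := by omega
            obtain ⟨hchv, hcntv⟩ := hpr (M - v) hMv0 (by omega)
            rcases hcntv with ⟨j0, ⟨hwit0, hmin0⟩, hcnt0⟩ | ⟨hnone, _⟩
            · have hj0j' : j0 ≤ j' := by
                by_contra hlt
                exact hmin0 j' (by omega) hwv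
              have hcle : ¬ (0 < PySem.List.pyGetD st.1 (M - v) 0) := by
                intro hpos
                exact hcond ⟨hvM, hpos⟩
              rw [hcnt0] at hcle
              have hj0a : (a : Int) ≤ (j0 : Int) := by omega
              have : ((j' + 1 : Nat) : Int) ≤ a := hw.1
              push_cast at this
              have : (j' : Int) < a := by omega
              have : (j0 : Int) ≤ (j' : Int) := by exact_mod_cast hj0j'
              omega
            · exact hnone ⟨j', hwv⟩
        refine ⟨hc1, hd1, ?_, ?_⟩
        · intro k hk0 hkn hMk
          exact hun k hk0 hkn (by omega)
        · intro k hk0 hkK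
          by_cases hkM : k = M
          · rw [hkM]
            refine ⟨?_, Or.inr ⟨hNE, (hun M hM0 (by omega) (le_refl M)).1⟩⟩
            rw [hdpM, hfalse]
            simp only [Bool.false_eq_true, false_iff]
            exact hNE
          · exact hpr k hk0 (by omega)

theorem bItemL_spec (n v a : Int) (hn : 0 ≤ n) (hv : 0 < v) (ha : 0 < a) (dp : List Bool)
    (hlen : dp.length = (n + 1).toNat) :
    (bItemL n dp v a).length = dp.length ∧
    ∀ k : Int, 0 ≤ k → k ≤ n →
      (PySem.List.pyGetD (bItemL n dp v a) k false = true ↔ ∃ j : Nat, WitP dp v a k j) := by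
  have h := bScan_aux n v a hn hv ha dp hlen ((n + 1).toNat) (n + 1) (by omega) (le_refl _) rfl
  unfold bItemL
  rw [if_neg (by rintro (h | h) <;> omega), if_neg (by omega)]
  exact ⟨by rw [h.2.1, hlen], fun k hk0 hkn => (h.2.2.2 k hk0 (by omega)).1⟩

-- ---- the per-item results coincide ----
theorem itemL_eq (n : Int) (hn : 0 ≤ n) (v a : Int) (hva : 0 ≤ v ∨ a ≤ 0) (dp : List Bool)
    (h : GoodDp n dp) : aItemL n dp v a = bItemL n dp v a ∧ GoodDp n (aItemL n dp v a) := by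
  obtain ⟨hlen, h0⟩ := h
  by_cases ha : a ≤ 0
  · have h1 : aItemL n dp v a = dp := by
      unfold aItemL
      rw [PySem.List.pyRange_one_eq_nil ha]
      rfl
    have h2 : bItemL n dp v a = dp := by
      unfold bItemL
      rw [if_pos (Or.inl ha)]
    rw [h1, h2]
    exact ⟨rfl, hlen, h0⟩
  · have ha' : 0 < a := by omega
    by_cases hvz : v = 0
    · subst hvz
      have h1 : aItemL n dp 0 a = dp := by
        unfold aItemL
        rw [PySem.List.foldl_congr_mem _ _ (fun d (_ : Int) => d) dp
          (by intro acc x _; exact aPassL_zero n acc)]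
        exact PySem.List.foldl_ignore _ _
      have h2 : bItemL n dp 0 a = dp := by
        unfold bItemL
        rw [if_pos (Or.inr rfl)]
      rw [h1, h2]
      exact ⟨rfl, hlen, h0⟩
    · have hvpos : 0 < v := by omega
      have hcast : ((a.toNat : Int)) = a := Int.toNat_of_nonneg (le_of_lt ha')
      obtain ⟨alen, aval⟩ := aItemL_spec n v hvpos a.toNat dp hlen
      rw [hcast] at alen aval
      obtain ⟨blen, bval⟩ := bItemL_spec n v a hn hvpos ha' dp hlen
      have hiff : ∀ k : Int, 0 ≤ k → k ≤ n →
          (PySem.List.pyGetD (aItemL n dp v a) k false = true ↔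
           PySem.List.pyGetD (bItemL n dp v a) k false = true) := by
        intro k hk0 hkn
        rw [aval k hk0 hkn, bval k hk0 hkn]
        constructor
        · rintro ⟨j, hja, hjv, hdp⟩
          exact ⟨j, ⟨by omega, hjv, hdp⟩⟩
        · rintro ⟨j, hja, hjv, hdp⟩
          exact ⟨j, by omega, hjv, hdp⟩
      have heq : aItemL n dp v a = bItemL n dp v a := by
        apply List.ext_getElem (by rw [alen, blen])
        intro i h1 h2
        have hi0 : (0 : Int) ≤ (i : Int) := by positivity
        have hin : (i : Int) ≤ n := by
          rw [alen, hlen] at h1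
          omega
        have hx := hiff (i : Int) hi0 hin
        rw [PySem.List.pyGetD_eq_getElem _ _ hi0 (by exact_mod_cast h1),
            PySem.List.pyGetD_eq_getElem _ _ hi0 (by exact_mod_cast h2)] at hx
        simp only [Int.toNat_natCast] at hx
        cases hA : (aItemL n dp v a)[i] <;> cases hB : (bItemL n dp v a)[i] <;> simp_all
      refine ⟨heq, by rw [alen, hlen], ?_⟩
      rw [aval 0 (le_refl 0) hn]
      exact ⟨0, Nat.zero_le _, by simp, by simpa using h0⟩

theorem foldL_eq (n : Int) (hn : 0 ≤ n) (P : List (Int × Int)) :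
    ∀ (dp : List Bool), (∀ p ∈ P, 0 ≤ p.1 ∨ p.2 ≤ 0) → GoodDp n dp →
    P.foldl (fun dp p => aItemL n dp p.1 p.2) dp = P.foldl (fun dp p => bItemL n dp p.1 p.2) dp ∧
    GoodDp n (P.foldl (fun dp p => aItemL n dp p.1 p.2) dp) := by
  induction P with
  | nil => intro dp _ h; exact ⟨rfl, h⟩
  | cons p t ih =>
    intro dp hva h
    obtain ⟨heq, hg⟩ := itemL_eq n hn p.1 p.2 (hva p (List.mem_cons_self ..)) dp h
    simp only [List.foldl_cons]
    rw [← heq]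
    exact ih _ (fun q hq => hva q (List.mem_cons_of_mem _ hq)) hg

-- ---- counting: A's loop over dp[1..n] vs B's sum(dp) - 1 ----
theorem countL_eq (n : Int) (hn : 0 ≤ n) (dp : List Bool) (h : GoodDp n dp) :
    aCountL n dp = dp.foldl (fun acc b => acc + (if b then 1 else 0)) 0 - 1 := by
  obtain ⟨hlen, h0⟩ := h
  unfold aCountL
  rw [PySem.List.foldl_if_add_one (p := fun i => PySem.List.pyGetD dp i false)]
  have hsum : dp.foldl (fun acc b => acc + (if b then (1 : Int) else 0)) 0 =
      (dp.countP (fun x => x) : Int) := by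
    rw [PySem.List.foldl_add (g := fun (b : Bool) => if b = true then (1 : Int) else 0)]
    simpa using PySem.List.sum_map_ite_one_zero (fun x => x) dp
  rw [hsum]
  have hdp : dp = (PySem.List.pyRange 0 (dp.length : Int) 1).map
      (fun j => PySem.List.pyGetD dp j false) := (PySem.List.map_pyGetD_pyRange_zero' dp false).symm
  have hcnt : dp.countP (fun x => x) =
      (PySem.List.pyRange 0 (n + 1) 1).countP (fun i => PySem.List.pyGetD dp i false) := by
    conv_lhs => rw [hdp]
    rw [List.countP_map]
    have hb : (dp.length : Int) = n + 1 := by rw [hlen]; omega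
    rw [hb]
    rfl
  rw [hcnt]
  rw [show (PySem.List.pyRange 0 (n + 1) 1) =
      PySem.List.pyRange 0 1 1 ++ PySem.List.pyRange 1 (n + 1) 1 from
    PySem.List.pyRange_one_append 0 1 (n + 1) (by omega) (by omega)]
  rw [List.countP_append]
  have h01 : PySem.List.pyRange 0 1 1 = [0] := by
    have := PySem.List.pyRange_one_singleton (0 : Int)
    simpa using this
  rw [h01]
  simp only [List.countP_cons, List.countP_nil, h0]
  push_cast
  ring

-- ---- A's outer index loop is the fold over zip ----
theorem outer_eq (n : Int) (value amount : List Int) (h : value.length ≤ amount.length) (dp0 : Array Bool) :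
    (PySem.List.pyRange 0 (PySem.List.len value) 1).foldl
      (fun dp i => aItem n dp (PySem.List.pyGetD value i 0) (PySem.List.pyGetD amount i 0)) dp0
    = (value.zip amount).foldl (fun dp p => aItem n dp p.1 p.2) dp0 := by
  have hP : (value.zip amount).length = value.length := by
    rw [List.length_zip]; omega
  have h1 : PySem.List.len value = ((value.zip amount).length : Int) := by
    rw [PySem.List.len_eq, hP]
  rw [h1]
  rw [PySem.List.foldl_congr_mem _ _
    (fun dp i => aItem n dp (PySem.List.pyGetD (value.zip amount) i ((0 : Int), (0 : Int))).1
      (PySem.List.pyGetD (value.zip amount) i ((0 : Int), (0 : Int))).2) dp0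
    (by
      intro acc i hi
      obtain ⟨hi0, hilt⟩ := PySem.List.mem_pyRange_one.mp hi
      have hiP : i.toNat < (value.zip amount).length := by omega
      have hiv : i.toNat < value.length := by omega
      have hia : i.toNat < amount.length := by
        rw [List.length_zip] at hiP; omega
      have hz : PySem.List.pyGetD (value.zip amount) i ((0 : Int), (0 : Int)) =
          (value[i.toNat], amount[i.toNat]) := by
        rw [PySem.List.pyGetD_eq_getElem _ _ hi0 (by omega)]
        simp [List.getElem_zip]
      simp only [hz]
      rw [PySem.List.pyGetD_eq_getElem value 0 hi0 (by omega),
          PySem.List.pyGetD_eq_getElem amount 0 hi0 (by omega)])]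
  exact PySem.List.foldl_pyRange_zero_pyGetD' (value.zip amount) ((0 : Int), (0 : Int))
    (fun dp p => aItem n dp p.1 p.2) dp0

-- ===== VERDICT (by name: the statement is the Claim_ definition above) =====
theorem backPackVIII_spec : Claim_equal_backPackVIII := by
  intro n value amount _hdom hpre
  obtain ⟨hn, hlen, hva⟩ := hpre
  unfold Spec_backPackVIII backPackVIII backPackVIII_alt
  rw [outer_eq n value amount hlen]
  rw [aCount_toList]
  have hfa : ((value.zip amount).foldl (fun dp p => aItem n dp p.1 p.2) (aInit n)).toList
      = (value.zip amount).foldl (fun dp p => aItemL n dp p.1 p.2) (aInitL n) := by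
    rw [← aInit_toList]
    exact (List.foldl_hom Array.toList (fun x y => (aItem_toList n x y.1 y.2).symm)).symm
  have hfb : ((value.zip amount).foldl (fun dp p => bItem n dp p.1 p.2) (bInit n)).toList
      = (value.zip amount).foldl (fun dp p => bItemL n dp p.1 p.2) (aInitL n) := by
    rw [← bInit_toList]
    exact (List.foldl_hom Array.toList (fun x y => (bItem_toList n x y.1 y.2).symm)).symm
  rw [hfa, bSum_toList, hfb]
  obtain ⟨heq, hgood⟩ := foldL_eq n hn (value.zip amount) (aInitL n) hva (aInitL_good n hn)
  rw [← heq]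
  exact countL_eq n hn _ hgood
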